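/- GENERATED by mk_final_copies.py from the proof of the farm's unit `start_decoder.F6c` (farm:start_decoder.F6c.1: Proof.lean) as the
   re-elaboration sweep compiled it — do not edit. -/
import Asan.CheckWalk
import Vorbis.Spec.Units.start_decoder_F6c
import Vorbis.Spec.Worked.start_decoder_F6c_Lemmas
import Vorbis.Spec.StartDecoderFloor

open X86 X86.User Asan Vorbis Vorbis.Spec Vorbis.Spec.StartDecoder

set_option maxRecDepth 100000
set_option maxHeartbeats 4000000

namespace Vorbis.Spec.start_decoder_F6c

/-- A small counter held zero-extended in a 32-bit register, as a signed number. -/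
theorem f6c_part32_toInt (k : Nat) (hk : k < 2 ^ 31) : (Word.part .w32 (UInt64.ofNat k)).toInt = (k : Int) := by
  rw [Vorbis.Spec.part32_toInt, Code.toNat_ofNat_lt _ (by omega)]
  have c1 := sint32_cases (k % 2 ^ 32)
  omega

/-- `lea eax, [r13 − 1]` of `values`, as a signed number. -/
theorem f6c_dec_toInt (V : Nat) (h1 : 1 ≤ V) (h2 : V < 2 ^ 31) :
    (BitVec.setWidth 32 (Word.ofBV (BitVec.ofNat 32 V) - 1).toBitVec).toInt = (V : Int) - 1 := by
  have e0 : (Word.ofBV (BitVec.ofNat 32 V)).toNat = V := by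
    rw [Vorbis.toNat_ofBV32, BitVec.toNat_ofNat]
    omega
  have e1 : (Word.ofBV (BitVec.ofNat 32 V) - 1).toNat = V - 1 := by
    u_omega
  rw [BitVec.toInt_eq_toNat_cond]
  simp only [BitVec.toNat_setWidth, UInt64.toNat_toBitVec, e1]
  omega

/-- `add r12d, 1` inside the 32-bit register: the counter `j + 1`. -/
theorem f6c_inc_part (j : Nat) (hj : j + 1 < 2 ^ 32) :
    Word.part .w32 (UInt64.ofNat j) + 1#32 = Word.part .w32 (UInt64.ofNat (j + 1)) := by
  apply BitVec.eq_of_toNat_eq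
  have e1 : (1#32).toNat = 1 := by decide
  have ea : (Word.part .w32 (UInt64.ofNat j)).toNat = j := by
    rw [Vorbis.toNat_part32, Code.toNat_ofNat_lt _ (by omega)]
    exact Nat.mod_eq_of_lt (by omega)
  have eb : (Word.part .w32 (UInt64.ofNat (j + 1))).toNat = j + 1 := by
    rw [Vorbis.toNat_part32, Code.toNat_ofNat_lt _ (by omega)]
    exact Nat.mod_eq_of_lt (by omega)
  rw [BitVec.toNat_add, ea, eb, e1]
  exact Nat.mod_eq_of_lt (by omega)

/-- The dword `values` as loaded into r13d, in the form of the assertion. -/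
theorem f6c_values_word (V : Nat) (h : V < 2 ^ 31) : Word.ofBV (BitVec.ofNat 32 V) = word32 (V : Int) := by
  rw [word32_nonneg _ (by omega) (by omega)]
  apply eq_addr
  rw [Vorbis.toNat_ofBV32, BitVec.toNat_ofNat]
  omega

/-- **The return of `error(f, VORBIS_invalid_setup)`, 0x1157ff (`cut225`)** (private to this unit): the loop assertion at this
address and eax = 0. -/
structure MidF6c (u₀ : State) (g : Ghost) (i : Nat) (A5 : Arena) (A : Arena × List Obj) (v : State) : Prop where
  loop : FloorLoop u₀ g L.start_decoder.cut225 i A5 A v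
  rax : v.reg .rax = 0

/-- **One round of loop 4020 up to the return of `error`** (0x11579e … 0x1157fa, 0x115804). -/
theorem f6c_round (Lay : Layout) (hLay : Lay.hi = 0x1000000) (μ : Microarch) (hμ : UserX.MicroOK μ) (u₀ : State)
    (hcode : HasCodeNat Lay u₀ Vorbis.L.start_decoder.entry Vorbis.Code.code_start_decoder.nat Vorbis.L.start_decoder.size)
    (hload2 : Asan.SmallCheck Lay μ Vorbis.WayInv (Vorbis.CodeOK u₀) [.rax, .rcx, .rdx] 2 Vorbis.L.__asan_load2_noabort.entry)
    (hload4 : Asan.SmallCheck Lay μ Vorbis.WayInv (Vorbis.CodeOK u₀) [.rax, .rcx, .rdx] 4 Vorbis.L.__asan_load4_noabort.entry)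
    (h_error : ∀ (others : List Obj) (frames : List (Nat × FrameLayout)),
      Calls Lay μ Vorbis.WayInv (Vorbis.conv u₀) Vorbis.L.error.entry (Vorbis.Spec.error.spec others frames))
    (g : Ghost) (i : Nat) (A5 : Arena) (A : Arena × List Obj) (mc : Int) (n j : Nat) (v : State)
    (hv : InF6 u₀ g i A5 A mc n Vorbis.L.start_decoder.loop24 v) (hr12 : v.reg .r12 = UInt64.ofNat j)
    (hj : (j : Int) ≤ Floor1.values v.mem (floorAt g v.mem i))
    (hpid : PID v.mem (floorAt g v.mem i) (g.R + 0x120)) :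
    ReachVia Lay μ WayInv v (fun w =>
      (AtF6Q u₀ g i w ∧ 250 - (w.reg .r12).toNat < 250 - (v.reg .r12).toNat) ∨ MidF6c u₀ g i A5 A w ∨ AtF6S u₀ g i w) := by
  have herr := h_error A.2 g.frames'
  have hst := St.of_inF6 hv
  have hlt : (i : Int) < stb_vorbis.floor_count v.mem g.f := hv.cur.base.base.lt
  have hgeo := Floor.geo hv.loop hlt
  obtain ⟨n1, n2, n3, n4⟩ := hst.nums
  have hspn : (v.reg .rsp).toNat = g.R := by
    rw [hst.rsp]
    exact toNat_addr _ (by omega)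
  have hfn : (v.reg .rbp).toNat = g.f := by
    rw [hst.rbp]
    exact toNat_addr _ (by have := hgeo.fhi; omega)
  have hwg := hst.where_g
  have hlg := hst.live_g
  obtain ⟨V, hVr, hV2, hV250, hVi⟩ := values_read hst.part.cur
  have hgbn : (v.reg .rbx).toNat = floorAt g v.mem i := by
    rw [hst.rbx]
    exact toNat_addr _ (by omega)
  have w_rip := hst.rip
  have w_eq : Mem.EqOn Vorbis.L.textLo Vorbis.L.textHi u₀.mem v.mem := hst.code
  have hdf : v.flags .df = false := (show abiInv _ from hst.inv).1
  have hmx : v.mxcsr &&& 0x1F80 = 0x1F80 := (show abiInv _ from hst.inv).2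
  have hsse := Vorbis.sseOK_of_abiInv hst.inv
  have z24 : v.mem.readLE (v.reg .rsp + 36) 4 = 0 := by
    have := hst.part.mid.consts.z24 (by omega) (by omega)
    rw [hst.rsp]
    simp only [vfield]
    exact this
  have rV : v.mem.readLE (v.reg .rbx + 1592) 4 = V := by
    rw [hst.rbx]
    simp only [vfield]
    exact hVr
  have hsh := hst.part.shadow
  rw [hVi] at hj
  have hjV : j ≤ V := by omega
  have hr12n : (v.reg .r12).toNat = j := by
    rw [hr12]
    exact Code.toNat_ofNat_lt _ (by omega)
  generalize hgi : floorAt g v.mem i = gi at *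
  u_walk hcode [hμ.vendor] until [Vorbis.L.start_decoder.loop24, Vorbis.L.start_decoder.loop25, Vorbis.L.start_decoder.cut225] span [Vorbis.L.textLo, Vorbis.L.textHi] side (v_side)
  case check_1157a5 =>
    -- 0x1157a5: load4 `g->values`
    have hun : ShadowUntouched v.mem s_1157a5.mem := by v_untouched
    exact hlg.accSmall hsh hun _ 4 (by decide) (by u_omega) (by u_omega)
  case check_1157c9 =>
    -- 0x1157c9: load2 `p[j].x`
    have hlt2 : j + 1 < V := by
      rw [f6c_dec_toInt V (by omega) (by omega), f6c_part32_toInt j (by omega)] at hbr_1157b8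
      omega
    have hJ := f6_sext_ofNat j (by omega)
    have hJ1 := f6_sext_ofNat (j + 1) (by omega)
    rw [← f6c_inc_part j (by omega)] at hJ1
    generalize Word.ofBV (BitVec.signExtend 64 (Word.part Width.w32 (UInt64.ofNat j) + 1#32)) = J1 at *
    generalize Word.ofBV (BitVec.signExtend 64 (Word.part Width.w32 (UInt64.ofNat j))) = J at *
    have hun : ShadowUntouched v.mem s_1157c9.mem := by v_untouched
    exact (live_p g A).accSmall hsh hun _ 2 (by decide) (by u_omega) (by u_omega)
  case check_1157e2 =>
    -- 0x1157e2: load2 `p[j+1].x`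
    have hlt2 : j + 1 < V := by
      rw [f6c_dec_toInt V (by omega) (by omega), f6c_part32_toInt j (by omega)] at hbr_1157b8
      omega
    have hJ := f6_sext_ofNat j (by omega)
    have hJ1 := f6_sext_ofNat (j + 1) (by omega)
    rw [← f6c_inc_part j (by omega)] at hJ1
    generalize Word.ofBV (BitVec.signExtend 64 (Word.part Width.w32 (UInt64.ofNat j) + 1#32)) = J1 at *
    generalize Word.ofBV (BitVec.signExtend 64 (Word.part Width.w32 (UInt64.ofNat j))) = J at *
    have hun : ShadowUntouched v.mem s_1157e2.mem := by v_untouched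
    exact (live_p g A).accSmall hsh hun _ 2 (by decide) (by u_omega) (by u_omega)
  case call_inv =>
    v_inv
  case pre_1157fa =>
    have hun : ShadowUntouched v.mem s_1157fa.mem := by v_untouched
    have hrdi : (s_1157fa.reg .rdi).toNat = g.f := by
      rw [w_rdi]
      exact hfn
    refine Floor.error_pre hv.loop ?_ hun hrdi
    rw [w_rsp]
    u_omega
  · -- 0x1157b8 `jle 115804` taken: `values − 1 ≤ j`; `j = 0`, r13d = values: the head of loop 4023
    have hge : V ≤ j + 1 := by
      rw [f6c_dec_toInt V (by omega) (by omega), f6c_part32_toInt j (by omega)] at hbr_1157b8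
      omega
    have hun : ShadowUntouched v.mem s_115804.mem := by v_untouched
    have hs : Mem.SameExcept [⟨g.R - 8, g.R⟩] v.mem s_115804.mem := by
      rw [w_mem]
      u_same
    have hws : ∀ w, w ∈ ([⟨g.R - 8, g.R⟩] : List Span) → Floor.Quiet g (floorAt g v.mem i) 838 838 w := by
      rw [hgi]
      intro w hwm
      simp only [List.mem_cons, List.mem_nil_iff, or_false] at hwm
      rcases hwm with rfl <;> unfold Floor.Quiet <;> simp only [] <;> omega
    have hwsW : ∀ w, w ∈ ([⟨g.R - 8, g.R⟩] : List Span) → Floor.Win g (floorAt g v.mem i) 838 838 w :=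
      fun w hwm => (hws w hwm).win
    have hrsp' : s_115804.reg .rsp = addr g.R := by
      rw [w_rsp]
      exact hst.rsp
    have hrbp' : s_115804.reg .rbp = addr g.f := by
      rw [w_kept.get .rbp rfl]
      exact hst.rbp
    have hloop' : FloorLoop u₀ g Vorbis.L.start_decoder.loop25 i A5 A s_115804 :=
      Floor.carry_quiet (lo := 838) (hi := 838) hv.loop hlt (by omega) w_rip hrsp' hrbp' (by v_inv) w_eq hs hws hun
    obtain ⟨eG, _, _, _⟩ := Floor.fields_same hgeo hs hwsW (by omega)
    have hcur' : Floor6 g s_115804.mem i mc n :=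
      Floor.floor6_carry hgeo hv.cur hv.n_le (by omega) (by omega) (by omega) hs hwsW
    have EA := Floor.elem_above hgeo hs (fun w hwm => (hwsW w hwm).winT (i := i)) (by omega) (by omega)
    rw [hgi] at eG EA
    have ev : Floor1.values s_115804.mem gi = Floor1.values v.mem gi := by
      simp only [vacc, voff]
      exact congrArg sint32 (EA.u32 _ (by omega) (by omega) (by omega))
    have eid : ∀ q : Nat, q < 250 →
        stbv__floor_ordering.id s_115804.mem (pAt (g.R + 0x120) q) = stbv__floor_ordering.id v.mem (pAt (g.R + 0x120) q) := by
      intro q hq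
      simp only [vacc, pAt, voff]
      unfold Mem.u16
      have ea := toNat_addr (g.R + 288 + 4 * q + 2) (by omega)
      apply hs.readLE _ 2 (by omega)
      intro w hwm
      simp only [List.mem_cons, List.mem_nil_iff, or_false] at hwm
      subst hwm
      simp only []
      omega
    have hpid' : PID s_115804.mem gi (g.R + 0x120) := by
      apply hpid.of_eq ev
      intro q hq
      exact eid q (by omega)
    have hrbx' : s_115804.reg .rbx = addr (floorAt g s_115804.mem i) := by
      rw [w_kept.get .rbx rfl, eG, ← hgi]
      exact hv.rbx
    refine ReachVia.done (Or.inr (Or.inr ?_))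
    unfold AtF6S
    refine ⟨A5, A, mc, n, 0, ⟨hloop', hrbx', hcur', hv.n_le⟩, ?_, ?_, ?_, ?_, SortedUpTo.zero _ _⟩
    · rw [eG]
      exact hpid'
    · rw [w_r13, eG, ev, hVi]
      exact f6c_values_word V (by omega)
    · rw [w_r12]
      rfl
    · rw [eG, ev, hVi]
      omega
  · -- 0x1157f0 `jne 11579e` taken: back at the head with `j + 1`
    have hlt2 : j + 1 < V := by
      rw [f6c_dec_toInt V (by omega) (by omega), f6c_part32_toInt j (by omega)] at hbr_1157b8
      omega
    have hJ := f6_sext_ofNat j (by omega)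
    have hJ1 := f6_sext_ofNat (j + 1) (by omega)
    rw [← f6c_inc_part j (by omega)] at hJ1
    generalize Word.ofBV (BitVec.signExtend 64 (Word.part Width.w32 (UInt64.ofNat j) + 1#32)) = J1 at *
    generalize Word.ofBV (BitVec.signExtend 64 (Word.part Width.w32 (UInt64.ofNat j))) = J at *
    have hun : ShadowUntouched v.mem s_1157f0.mem := by v_untouched
    have hs : Mem.SameExcept [⟨g.R - 8, g.R⟩] v.mem s_1157f0.mem := by
      rw [w_mem]
      u_same
    have hws : ∀ w, w ∈ ([⟨g.R - 8, g.R⟩] : List Span) → Floor.Quiet g (floorAt g v.mem i) 838 838 w := by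
      rw [hgi]
      intro w hwm
      simp only [List.mem_cons, List.mem_nil_iff, or_false] at hwm
      rcases hwm with rfl <;> unfold Floor.Quiet <;> simp only [] <;> omega
    have hwsW : ∀ w, w ∈ ([⟨g.R - 8, g.R⟩] : List Span) → Floor.Win g (floorAt g v.mem i) 838 838 w :=
      fun w hwm => (hws w hwm).win
    have hrsp' : s_1157f0.reg .rsp = addr g.R := by
      rw [w_rsp]
      exact hst.rsp
    have hrbp' : s_1157f0.reg .rbp = addr g.f := by
      rw [w_kept.get .rbp rfl]
      exact hst.rbp
    have hloop' : FloorLoop u₀ g Vorbis.L.start_decoder.loop24 i A5 A s_1157f0 :=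
      Floor.carry_quiet (lo := 838) (hi := 838) hv.loop hlt (by omega) w_rip hrsp' hrbp' (by v_inv) w_eq hs hws hun
    obtain ⟨eG, _, _, _⟩ := Floor.fields_same hgeo hs hwsW (by omega)
    have hcur' : Floor6 g s_1157f0.mem i mc n :=
      Floor.floor6_carry hgeo hv.cur hv.n_le (by omega) (by omega) (by omega) hs hwsW
    have EA := Floor.elem_above hgeo hs (fun w hwm => (hwsW w hwm).winT (i := i)) (by omega) (by omega)
    rw [hgi] at eG EA
    have ev : Floor1.values s_1157f0.mem gi = Floor1.values v.mem gi := by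
      simp only [vacc, voff]
      exact congrArg sint32 (EA.u32 _ (by omega) (by omega) (by omega))
    have eid : ∀ q : Nat, q < 250 →
        stbv__floor_ordering.id s_1157f0.mem (pAt (g.R + 0x120) q) = stbv__floor_ordering.id v.mem (pAt (g.R + 0x120) q) := by
      intro q hq
      simp only [vacc, pAt, voff]
      unfold Mem.u16
      have ea := toNat_addr (g.R + 288 + 4 * q + 2) (by omega)
      apply hs.readLE _ 2 (by omega)
      intro w hwm
      simp only [List.mem_cons, List.mem_nil_iff, or_false] at hwm
      subst hwm
      simp only []
      omega
    have hpid' : PID s_1157f0.mem gi (g.R + 0x120) := by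
      apply hpid.of_eq ev
      intro q hq
      exact eid q (by omega)
    have hrbx' : s_1157f0.reg .rbx = addr (floorAt g s_1157f0.mem i) := by
      rw [w_kept.get .rbx rfl, eG, ← hgi]
      exact hv.rbx
    have e12 : s_1157f0.reg .r12 = UInt64.ofNat (j + 1) := by
      rw [w_r12]
      exact f6_inc32_ofNat j (by omega)
    refine ReachVia.done (Or.inl ⟨?_, ?_⟩)
    · unfold AtF6Q
      refine ⟨A5, A, mc, n, j + 1, ⟨hloop', hrbx', hcur', hv.n_le⟩, e12, ?_, ?_⟩
      · rw [eG, ev, hVi]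
        omega
      · rw [eG]
        exact hpid'
    · rw [e12, Code.toNat_ofNat_lt _ (by omega), Code.toNat_ofNat_lt _ (by omega)]
      omega
  · -- 0x1157ff: `error(f, VORBIS_invalid_setup)` returned
    v_after_call w_rsp_1157fa w_mem_1157fa
    simp only [w_rdi_1157fa] at w_same
    obtain ⟨hrax0, hpu, _⟩ := w_post
    have hun0 : ShadowUntouched v.mem s_1157fa.mem := by
      rw [w_mem_1157fa]
      v_untouched
    have hun : ShadowUntouched v.mem s_1157far.mem := Mem.EqOn.trans hun0 hpu
    have hs : Mem.SameExcept [⟨g.R - 56, g.R⟩, ⟨g.f + 140, g.f + 144⟩] v.mem s_1157far.mem := by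
      u_same
    have hws : ∀ w, w ∈ ([⟨g.R - 56, g.R⟩, ⟨g.f + 140, g.f + 144⟩] : List Span) →
        Floor.Quiet g (floorAt g v.mem i) 838 838 w := by
      rw [hgi]
      intro w hwm
      simp only [List.mem_cons, List.mem_nil_iff, or_false] at hwm
      rcases hwm with rfl | rfl <;> unfold Floor.Quiet <;> simp only [] <;> omega
    have hrsp' : s_1157far.reg .rsp = addr g.R := by
      rw [← hst.rsp, w_rsp]
    have hrbp' : s_1157far.reg .rbp = addr g.f := by
      rw [w_kept .rbp rfl]
      exact hst.rbp
    have hloop' : FloorLoop u₀ g Vorbis.L.start_decoder.cut225 i A5 A s_1157far :=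
      Floor.carry_quiet (lo := 838) (hi := 838) hv.loop hlt (by omega) w_rip hrsp' hrbp' w_inv w_eq hs hws hun
    exact ReachVia.done (Or.inr (Or.inl ⟨hloop', hrax0⟩))

/-- **The stub's `jmp 113b22`** (0x1157ff): from the return of `error` to the epilogue with eax = 0; nothing is written. -/
theorem f6c_err (Lay : Layout) (hLay : Lay.hi = 0x1000000) (μ : Microarch) (hμ : UserX.MicroOK μ) (u₀ : State)
    (hcode : HasCodeNat Lay u₀ Vorbis.L.start_decoder.entry Vorbis.Code.code_start_decoder.nat Vorbis.L.start_decoder.size)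
    (g : Ghost) (i : Nat) (A5 : Arena) (A : Arena × List Obj) (v : State) (h : MidF6c u₀ g i A5 A v) :
    ReachVia Lay μ WayInv v (fun w => AtERR u₀ g w) := by
  have hfr := h.loop.frame
  have he := hfr.entry
  v_entry he
  simp only [depth] at he_room he_stack
  have w_rip := hfr.rip
  have w_eq : Mem.EqOn Vorbis.L.textLo Vorbis.L.textHi u₀.mem v.mem := hfr.code
  have hdf : v.flags .df = false := (show abiInv _ from hfr.inv).1
  have hmx : v.mxcsr &&& 0x1F80 = 0x1F80 := (show abiInv _ from hfr.inv).2
  have hsse := Vorbis.sseOK_of_abiInv hfr.inv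
  u_walk hcode [hμ.vendor] until [pc_ERR] span [Vorbis.L.textLo, Vorbis.L.textHi] side (v_side)
  refine ReachVia.done (Floor.atERR (Floor.same_mem h.loop w_mem w_rip ?_ ?_ (by v_inv)) ?_)
  · rw [w_kept.get .rsp rfl]
    exact hfr.rsp
  · rw [w_kept.get .rbp rfl]
    exact h.loop.rbp
  · rw [w_kept.get .rax rfl, h.rax]
    rfl

end Vorbis.Spec.start_decoder_F6c

theorem Vorbis.Spec.Worked.start_decoder_F6c_ok : Vorbis.Spec.start_decoder_F6c.Statement := by
  intro Lay hLay μ hμ u₀ hcode hload2 hload4 h_error g i v hat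
  obtain ⟨A5, A, mc, n, j, hv, hr12, hj, hpid⟩ := hat
  refine (Vorbis.Spec.start_decoder_F6c.f6c_round Lay hLay μ hμ u₀ hcode hload2 hload4 h_error g i A5 A mc n j v hv hr12 hj
    hpid).trans ?_
  intro w hw
  rcases hw with hq | hm | hs
  · exact ReachVia.done (Or.inl hq)
  · exact (Vorbis.Spec.start_decoder_F6c.f6c_err Lay hLay μ hμ u₀ hcode g i A5 A w hm).mono
      (fun w' h' => Or.inr (Or.inl h'))
  · exact ReachVia.done (Or.inr (Or.inr hs))
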